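-- pv_equiv track=rewrite | github.com/liamslj13/programming-problems | kattis/99_Problems.py | search_down
-- ===== SOURCE A (Python) =====
-- def search_down(N: str) -> int:
--     if int(N) < 100:
--         return 99
--     N_int = int(N)
--     count = 0
--     while str(N_int)[-2:] != '99':
--         N_int -= 1
--         count += 1
--     return count
-- ===== SOURCE B (Python) =====
-- def search_down(N: str) -> int:
--     n = int(N)
--     if n < 100:
--         return 99
--     return (n % 100 - 99) % 100
-- ===== Notes on version B (the rewrite author's own statement) =====
-- stated objective: faster
-- what changed: The decrement-and-restringify loop (up to 99 iterations, each converting the integer to a string to test its last two characters) is replaced by the closed-form modular expression (n % 100 - 99) % 100.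
import Mathlib
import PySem

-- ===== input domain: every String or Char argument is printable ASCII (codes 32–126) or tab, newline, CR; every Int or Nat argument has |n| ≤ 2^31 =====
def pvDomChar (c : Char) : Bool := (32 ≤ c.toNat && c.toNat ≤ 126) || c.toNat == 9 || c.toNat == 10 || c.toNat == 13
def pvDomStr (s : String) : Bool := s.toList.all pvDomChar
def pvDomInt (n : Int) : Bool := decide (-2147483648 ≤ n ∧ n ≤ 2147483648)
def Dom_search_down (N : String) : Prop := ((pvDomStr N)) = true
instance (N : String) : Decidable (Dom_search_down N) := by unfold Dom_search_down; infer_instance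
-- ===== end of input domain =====

-- B replaces A's decrement-and-restringify loop by the closed-form modular expression (n % 100 - 99) % 100.


-- ===== PORT A =====
-- the while loop: `while str(N_int)[-2:] != '99': N_int -= 1; count += 1`.
-- Fuel 100 never runs out: the loop is entered only with N_int ≥ 100, where a number whose
-- decimal form ends in '99' is reached in at most 99 decrements (proved in the lemmas below).
def searchLoopA (fuel : Nat) (nInt count : Int) : Int :=
  match fuel with
  | 0 => count
  | f + 1 =>
    if PySem.List.slice (PySem.Int.toChars nInt) (some (-2)) none ≠ ['9', '9'] then
      searchLoopA f (nInt - 1) (count + 1)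
    else count

def search_down (N : String) : Int :=
  match PySem.Int.ofStr? N with
  | none => 0          -- int(N) raises ValueError; excluded by Pre_search_down
  | some n => if n < 100 then 99 else searchLoopA 100 n 0

-- ===== PORT B =====
def search_down_alt (N : String) : Int :=
  match PySem.Int.ofStr? N with
  | none => 0          -- int(N) raises ValueError; excluded by Pre_search_down
  | some n => if n < 100 then 99 else PySem.Int.mod (PySem.Int.mod n 100 - 99) 100

-- ===== PRECONDITION & SPEC =====
-- Pre_ excludes exactly the strings on which int(N) raises ValueError (both programs call int(N) first).
def Pre_search_down (N : String) : Prop := (PySem.Int.ofStr? N).isSome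
instance (N : String) : Decidable (Pre_search_down N) := by unfold Pre_search_down; infer_instance
def pvWitness_search_down : String := "256"

def Spec_search_down (N : String) (out : Int) : Prop := out = search_down_alt N
instance (N : String) (out : Int) : Decidable (Spec_search_down N out) := by unfold Spec_search_down; infer_instance

-- ===== CLAIM (what is proved, stated in full; the proofs are below) =====
def Claim_equal_search_down : Prop := ∀ (N : String), Dom_search_down N → Pre_search_down N → Spec_search_down N (search_down N)

-- ===== LEMMAS AND PROOFS =====

-- Nat.toDigitsCore: the accumulator is a suffix.
lemma toDigitsCore_acc (f : Nat) : ∀ (n : Nat) (L : List Char),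
    Nat.toDigitsCore 10 f n L = Nat.toDigitsCore 10 f n [] ++ L := by
  induction f with
  | zero => intro n L; simp [Nat.toDigitsCore]
  | succ f ih =>
    intro n L
    simp only [Nat.toDigitsCore]
    by_cases h : n / 10 = 0
    · simp [h]
    · simp only [h, if_false]
      rw [ih (n / 10) (Nat.digitChar (n % 10) :: L), ih (n / 10) [Nat.digitChar (n % 10)]]
      simp

-- Nat.toDigitsCore is fuel-irrelevant once fuel exceeds the number.
lemma toDigitsCore_fuel (f1 : Nat) : ∀ (f2 n : Nat), n < f1 → n < f2 →
    Nat.toDigitsCore 10 f1 n [] = Nat.toDigitsCore 10 f2 n [] := by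
  induction f1 with
  | zero => intro f2 n h1; omega
  | succ f1 ih =>
    intro f2 n h1 h2
    match f2 with
    | 0 => omega
    | f2 + 1 =>
      simp only [Nat.toDigitsCore]
      by_cases h : n / 10 = 0
      · simp [h]
      · simp only [h, if_false]
        rw [toDigitsCore_acc f1, toDigitsCore_acc f2, ih f2 (n / 10) (by omega) (by omega)]

lemma toDigits_small {m : Nat} (h : m < 10) : Nat.toDigits 10 m = [Nat.digitChar m] := by
  simp [Nat.toDigits, Nat.toDigitsCore, Nat.div_eq_of_lt h, Nat.mod_eq_of_lt h]

lemma toDigits_step {m : Nat} (h : 10 ≤ m) :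
    Nat.toDigits 10 m = Nat.toDigits 10 (m / 10) ++ [Nat.digitChar (m % 10)] := by
  show Nat.toDigitsCore 10 (m + 1) m [] = _
  have hd : m / 10 ≠ 0 := by omega
  simp only [Nat.toDigitsCore, hd, if_false]
  rw [toDigitsCore_acc m (m / 10) [Nat.digitChar (m % 10)]]
  rw [toDigitsCore_fuel m (m / 10 + 1) (m / 10) (by omega) (by omega)]
  rfl

-- decimal form of m ≥ 10: some prefix followed by its last two digit characters
lemma toDigits_last_two {m : Nat} (h : 10 ≤ m) :
    ∃ P : List Char, Nat.toDigits 10 m = P ++ [Nat.digitChar (m / 10 % 10), Nat.digitChar (m % 10)] := by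
  rw [toDigits_step h]
  by_cases h2 : m / 10 < 10
  · exact ⟨[], by rw [toDigits_small h2, Nat.mod_eq_of_lt h2]; rfl⟩
  · refine ⟨Nat.toDigits 10 (m / 10 / 10), ?_⟩
    rw [toDigits_step (by omega : 10 ≤ m / 10)]
    simp

lemma digitChar_eq_nine {k : Nat} (hk : k < 10) : Nat.digitChar k = '9' ↔ k = 9 := by
  interval_cases k <;> simp [Nat.digitChar]

-- the loop test: for n ≥ 99, str(n)[-2:] == '99' exactly when n % 100 == 99
lemma cond_iff {n : Int} (h : 99 ≤ n) :
    PySem.List.slice (PySem.Int.toChars n) (some (-2)) none = ['9', '9'] ↔ n % 100 = 99 := by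
  have hn0 : ¬ n < 0 := by omega
  have hm : 10 ≤ n.toNat := by omega
  obtain ⟨P, hP⟩ := toDigits_last_two hm
  have : PySem.Int.toChars n = Nat.toDigits 10 n.toNat := by
    simp [PySem.Int.toChars, hn0]
  rw [this, hP, PySem.List.slice_from_neg_ofNat _ 2 (by omega)]
  have hlen : (P ++ [Nat.digitChar (n.toNat / 10 % 10), Nat.digitChar (n.toNat % 10)]).length - 2
      = P.length := by simp
  rw [hlen]
  rw [List.drop_left]
  constructor
  · intro hEq
    have h1 : Nat.digitChar (n.toNat / 10 % 10) = '9' := by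
      have := congrArg (·.headI) hEq; simpa using this
    have h2 : Nat.digitChar (n.toNat % 10) = '9' := by
      have := congrArg (·.getLast?) hEq; simpa using this
    have e1 : n.toNat / 10 % 10 = 9 := (digitChar_eq_nine (by omega)).mp h1
    have e2 : n.toNat % 10 = 9 := (digitChar_eq_nine (by omega)).mp h2
    omega
  · intro hEq
    have e1 : n.toNat / 10 % 10 = 9 := by omega
    have e2 : n.toNat % 10 = 9 := by omega
    rw [e1, e2]; rfl

-- the loop computes count + (n + 1) % 100, given enough fuel
lemma searchLoopA_eq (fuel : Nat) : ∀ (n count : Int), 99 ≤ n → ((n + 1) % 100).toNat ≤ fuel →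
    searchLoopA fuel n count = count + (n + 1) % 100 := by
  induction fuel with
  | zero =>
    intro n count h99 hf
    have : (n + 1) % 100 = 0 := by omega
    simp [searchLoopA, this]
  | succ f ih =>
    intro n count h99 hf
    simp only [searchLoopA]
    by_cases hc : n % 100 = 99
    · have : (n + 1) % 100 = 0 := by omega
      rw [if_neg (by simpa using (cond_iff h99).mpr hc), this]
      ring
    · rw [if_pos (by simpa using fun hEq => hc ((cond_iff h99).mp hEq))]
      have hge : 100 ≤ n := by omega
      rw [ih (n - 1) (count + 1) (by omega) (by omega)]
      omega

-- ===== VERDICT =====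
theorem search_down_spec : Claim_equal_search_down := by
  intro N _ hPre
  unfold Spec_search_down search_down search_down_alt
  cases hS : PySem.Int.ofStr? N with
  | none => rfl
  | some n =>
    simp only []
    by_cases h : n < 100
    · simp [h]
    · rw [if_neg h, if_neg h]
      rw [searchLoopA_eq 100 n 0 (by omega) (by omega)]
      rw [PySem.Int.mod_eq_emod_of_pos (b := 100) (by omega), PySem.Int.mod_eq_emod_of_pos (b := 100) (by omega)]
      omega
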